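-- pv_equiv track=rewrite | github.com/anna-lcg/AdventOfCode | 2015/Day_03_code.py | part2
-- ===== SOURCE A (Python) =====
-- def part2(puzzle_input):
--     Robot=True
--     xRoboSanta=0
--     xSanta=0
--     yRoboSanta=0
--     ySanta=0
--     recipients = {(0,0):1}
--     for i in puzzle_input:
--         Robot =not Robot
--         if i == '^':
--             if Robot:
--                 yRoboSanta+=1
--             else:
--                 ySanta+=1
--         elif i =='v':
--             if Robot:
--                 yRoboSanta-=1
--             else:
--                 ySanta-=1
--         elif i =='>':
--             if Robot:
--                 xRoboSanta+=1
--             else: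
--                 xSanta+=1
--         elif i =='<':
--             if Robot:
--                 xRoboSanta-=1
--             else:
--                 xSanta-=1
--         else:
--             print ('error', i)
--         if Robot:
--             position = (xRoboSanta,yRoboSanta)
--         else:
--             position = (xSanta,ySanta)
--         if position in recipients:
--             recipients[position]+=1
--         else:
--             recipients[position]=1
--     return recipients
-- ===== SOURCE B (Python) =====
-- def part2(puzzle_input):
--     # Parity-split decomposition: slice the instructions into Santa's (even
--     # indices) and Robo-Santa's (odd indices) subsequences, walk each one
--     # independently to get its trail of positions, interleave the two trails
--     # back into chronological order, then count in one final pass.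
--     # (A's print('error', c) side effect happens per walk here, so the order
--     # of error messages can differ from A; the returned dict is the same.)
--     deltas = {'^': (0, 1), 'v': (0, -1), '>': (1, 0), '<': (-1, 0)}
--
--     def walk(moves):
--         x = y = 0
--         trail = []
--         for c in moves:
--             if c in deltas:
--                 dx, dy = deltas[c]
--                 x += dx
--                 y += dy
--             else:
--                 print('error', c)
--             trail.append((x, y))
--         return trail
--
--     santa_trail = walk(puzzle_input[0::2])
--     robo_trail = walk(puzzle_input[1::2])
--
--     ordered = [(0, 0)]
--     for s, r in zip(santa_trail, robo_trail):
--         ordered.append(s)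
--         ordered.append(r)
--     if len(robo_trail) < len(santa_trail):
--         ordered.append(santa_trail[-1])
--
--     counts = {}
--     for p in ordered:
--         counts[p] = counts.get(p, 0) + 1
--     return counts
-- ===== Notes on version B (the rewrite author's own statement) =====
-- stated objective: alternative
-- what changed: B replaces A's single interleaved state machine (Robot toggle, four coordinates, inline dict update) by a staged parity-split pipeline: slice the input into puzzle_input[0::2] and [1::2], walk each subsequence independently to a trail of positions, zip-interleave the trails back into chronological order, and count in one separate final pass.
import Mathlib
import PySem

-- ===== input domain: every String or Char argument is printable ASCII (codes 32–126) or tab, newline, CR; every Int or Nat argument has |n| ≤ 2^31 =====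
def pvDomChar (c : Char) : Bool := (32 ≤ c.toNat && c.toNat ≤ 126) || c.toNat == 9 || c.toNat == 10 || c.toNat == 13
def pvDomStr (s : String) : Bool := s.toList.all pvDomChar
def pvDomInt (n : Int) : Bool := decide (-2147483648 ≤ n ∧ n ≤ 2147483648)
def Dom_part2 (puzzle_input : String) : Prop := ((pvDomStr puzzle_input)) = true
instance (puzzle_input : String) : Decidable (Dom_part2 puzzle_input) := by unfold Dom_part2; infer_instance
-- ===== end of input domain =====

-- B is a parity-split pipeline (slice into the two movers' subsequences, walk each, interleave, count);
-- objective: alternative decomposition, same O(n) cost.  A's print('error', c) side effect is not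
-- modelled and its stdout order differs in B for interleaved invalid characters; the return value is proved equal.

-- ===== PORT A =====
-- state: (Robot, xRoboSanta, xSanta, yRoboSanta, ySanta, recipients)
def stepA (st : Bool × Int × Int × Int × Int × PySem.Dict (Int × Int) Int) (i : Char) :
    Bool × Int × Int × Int × Int × PySem.Dict (Int × Int) Int :=
  match st with
  | (robot0, xR, xS, yR, yS, d) =>
    let robot := !robot0
    let (xR, xS, yR, yS) :=
      if i = '^' then (if robot then (xR, xS, yR + 1, yS) else (xR, xS, yR, yS + 1))
      else if i = 'v' then (if robot then (xR, xS, yR - 1, yS) else (xR, xS, yR, yS - 1))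
      else if i = '>' then (if robot then (xR + 1, xS, yR, yS) else (xR, xS + 1, yR, yS))
      else if i = '<' then (if robot then (xR - 1, xS, yR, yS) else (xR, xS - 1, yR, yS))
      else (xR, xS, yR, yS)  -- print('error', i): side effect only
    let position := if robot then (xR, yR) else (xS, yS)
    let d :=
      if d.contains position then d.insert position (d.getD position 0 + 1)
      else d.insert position 1
    (robot, xR, xS, yR, yS, d)

def part2 (puzzle_input : String) : List (Int × Int × Int) :=
  let st := puzzle_input.toList.foldl stepA
    (true, 0, 0, 0, 0, PySem.Dict.ofList [(((0 : Int), (0 : Int)), (1 : Int))])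
  st.2.2.2.2.2.items.map (fun p => (p.1.1, p.1.2, p.2))

-- ===== PORT B =====
def bDeltas : PySem.Dict Char (Int × Int) :=
  PySem.Dict.ofList [('^', (0, 1)), ('v', (0, -1)), ('>', (1, 0)), ('<', (-1, 0))]

-- one step of walk's loop; state (x, y, trail)
def stepW (st : Int × Int × List (Int × Int)) (c : Char) : Int × Int × List (Int × Int) :=
  match st with
  | (x, y, trail) =>
    let (x, y) :=
      if bDeltas.contains c then
        let dxy := bDeltas.getD c (0, 0)  -- deltas[c]; present since 'c in deltas'
        (x + dxy.1, y + dxy.2)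
      else (x, y)  -- print('error', c): side effect only
    (x, y, trail ++ [(x, y)])

def walkB (moves : List Char) : List (Int × Int) :=
  (moves.foldl stepW (0, 0, [])).2.2

def part2_alt (puzzle_input : String) : List (Int × Int × Int) :=
  let santaTrail := walkB ((PySem.List.slice? puzzle_input.toList (some 0) none 2).getD [])
  let roboTrail := walkB ((PySem.List.slice? puzzle_input.toList (some 1) none 2).getD [])
  let ordered := (santaTrail.zip roboTrail).foldl (fun a p => a ++ [p.1] ++ [p.2]) [((0 : Int), (0 : Int))]
  let ordered :=
    if roboTrail.length < santaTrail.length then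
      ordered ++ [(PySem.List.pyGet? santaTrail (-1)).getD (0, 0)]  -- santa_trail[-1]; nonempty under the guard
    else ordered
  let counts := ordered.foldl (fun d p => d.insert p (d.getD p 0 + 1))
    (PySem.Dict.empty : PySem.Dict (Int × Int) Int)
  counts.items.map (fun p => (p.1.1, p.1.2, p.2))

-- ===== PRECONDITION & SPEC =====
def Spec_part2 (puzzle_input : String) (out : List (Int × Int × Int)) : Prop := out = part2_alt puzzle_input
instance (puzzle_input : String) (out : List (Int × Int × Int)) : Decidable (Spec_part2 puzzle_input out) := by unfold Spec_part2; infer_instance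

-- ===== CLAIM (what is proved, stated in full; the proofs are below) =====
def Claim_equal_part2 : Prop := ∀ (puzzle_input : String), Dom_part2 puzzle_input → Spec_part2 puzzle_input (part2 puzzle_input)

-- ===== LEMMAS AND PROOFS =====

-- the chronological sequence of positions visited (after the seed); santaTurn: whether Santa moves next
def gen : List Char → Bool → (Int × Int) → (Int × Int) → List (Int × Int)
  | [], _, _, _ => []
  | c :: cs, santaTurn, pS, pR =>
    let dxy := bDeltas.getD c (0, 0)
    if santaTurn then
      let pS' := (pS.1 + dxy.1, pS.2 + dxy.2)
      pS' :: gen cs (!santaTurn) pS' pR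
    else
      let pR' := (pR.1 + dxy.1, pR.2 + dxy.2)
      pR' :: gen cs (!santaTurn) pS pR'

-- elements at even / odd indices
def evens {α : Type} : List α → List α
  | [] => []
  | [x] => [x]
  | x :: _ :: t => x :: evens t

def odds {α : Type} (l : List α) : List α := evens l.tail

-- trail of one mover walking the given moves
def trailFrom : List Char → (Int × Int) → List (Int × Int)
  | [], _ => []
  | c :: cs, p =>
    let dxy := bDeltas.getD c (0, 0)
    let p' := (p.1 + dxy.1, p.2 + dxy.2)
    p' :: trailFrom cs p'

-- interleave, first list first
def itl {α : Type} : List α → List α → List α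
  | [], ys => ys
  | x :: xs, ys => x :: itl ys xs
  termination_by xs ys => xs.length + ys.length

lemma bDeltas_mk : bDeltas = PySem.Dict.mk [('^', (0, 1)), ('v', (0, -1)), ('>', (1, 0)), ('<', (-1, 0))] := by
  decide

lemma bDeltas_other (c : Char) (h1 : c ≠ '^') (h2 : c ≠ 'v') (h3 : c ≠ '>') (h4 : c ≠ '<') :
    bDeltas.getD c (0, 0) = (0, 0) := by
  simp [bDeltas_mk, PySem.Dict.getD_eq_get?_getD, PySem.Dict.get?,
    Ne.symm h1, Ne.symm h2, Ne.symm h3, Ne.symm h4]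

lemma bDeltas_up : bDeltas.getD '^' (0, 0) = (0, 1) := by decide
lemma bDeltas_down : bDeltas.getD 'v' (0, 0) = (0, -1) := by decide
lemma bDeltas_right : bDeltas.getD '>' (0, 0) = (1, 0) := by decide
lemma bDeltas_left : bDeltas.getD '<' (0, 0) = (-1, 0) := by decide

lemma dict_step (d : PySem.Dict (Int × Int) Int) (p : Int × Int) :
    (if d.contains p then d.insert p (d.getD p 0 + 1) else d.insert p 1)
      = d.insert p (d.getD p 0 + 1) := by
  by_cases h : d.contains p = true
  · simp [h]
  · have h' : d.contains p = false := by simpa using h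
    simp [h', PySem.Dict.getD_of_not_contains d 0 h']

lemma LA : ∀ (cs : List Char) (robot0 : Bool) (xR xS yR yS : Int)
    (d : PySem.Dict (Int × Int) Int),
    (cs.foldl stepA (robot0, xR, xS, yR, yS, d)).2.2.2.2.2
      = (gen cs robot0 (xS, yS) (xR, yR)).foldl
          (fun d p => d.insert p (d.getD p 0 + 1)) d := by
  intro cs
  induction cs with
  | nil => intro robot0 xR xS yR yS d; simp [gen]
  | cons c cs ih =>
    intro robot0 xR xS yR yS d
    simp only [List.foldl_cons, stepA, dict_step]
    by_cases h1 : c = '^'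
    · subst h1; cases robot0 <;> simp [gen, bDeltas_up, ih]
    · by_cases h2 : c = 'v'
      · subst h2; cases robot0 <;> simp [gen, bDeltas_down, ih, sub_eq_add_neg]
      · by_cases h3 : c = '>'
        · subst h3; cases robot0 <;> simp [gen, bDeltas_right, ih]
        · by_cases h4 : c = '<'
          · subst h4; cases robot0 <;> simp [gen, bDeltas_left, ih, sub_eq_add_neg]
          · cases robot0 <;>
              simp [gen, h1, h2, h3, h4, bDeltas_other c h1 h2 h3 h4, ih]

-- walk's loop accumulates exactly trailFrom
lemma walk_eq : ∀ (moves : List Char) (x y : Int) (trail : List (Int × Int)),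
    (moves.foldl stepW (x, y, trail)).2.2 = trail ++ trailFrom moves (x, y) := by
  intro moves
  induction moves with
  | nil => intro x y trail; simp [trailFrom]
  | cons c cs ih =>
    intro x y trail
    by_cases h : bDeltas.contains c = true
    · simp [stepW, h, trailFrom, ih]
    · have h' : bDeltas.contains c = false := by simpa using h
      simp [stepW, h', trailFrom, ih, PySem.Dict.getD_of_not_contains bDeltas (0, 0) h']

lemma trailFrom_length (moves : List Char) : ∀ p, (trailFrom moves p).length = moves.length := by
  induction moves with
  | nil => intro p; simp [trailFrom]
  | cons c cs ih => intro p; simp [trailFrom, ih]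

lemma evens_length {α : Type} : ∀ (l : List α), (evens l).length = (l.length + 1) / 2 := by
  intro l
  induction l using evens.induct with
  | case1 => simp [evens]
  | case2 x => simp [evens]
  | case3 x y t ih => simp only [evens, List.length_cons, ih]; omega

lemma evens_cons {α : Type} (c : α) (cs : List α) : evens (c :: cs) = c :: odds cs := by
  cases cs <;> simp [evens, odds]

lemma filterMap_range_evens {α : Type} :
    ∀ (xs : List α), (List.range ((xs.length + 1) / 2)).filterMap (fun k => xs[2 * k]?) = evens xs := by
  intro xs
  induction xs using evens.induct with
  | case1 => simp [evens]
  | case2 x => simp [evens, List.range_succ]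
  | case3 x y t ih =>
    have hc : ((x :: y :: t).length + 1) / 2 = (t.length + 1) / 2 + 1 := by
      simp only [List.length_cons]; omega
    rw [hc, List.range_succ_eq_map]
    simp only [List.filterMap_cons, List.filterMap_map]
    have : ∀ k, ((fun k => (x :: y :: t)[2 * k]?) ∘ Nat.succ) k = (fun k => t[2 * k]?) k := by
      intro k
      have : 2 * Nat.succ k = (2 * k) + 1 + 1 := by omega
      simp [this]
    rw [List.filterMap_congr (fun k _ => this k)]
    simp [evens, ih]

lemma count_even (n : Nat) :
    (if 0 < n then (((n : Int) + 2 - 1) / 2).toNat else 0) = (n + 1) / 2 := by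
  split_ifs <;> omega

lemma slice_even {α : Type} (xs : List α) :
    (PySem.List.slice? xs (some 0) none 2).getD [] = evens xs := by
  rw [← filterMap_range_evens]
  simp only [PySem.List.slice?, PySem.List.sliceIndices]
  norm_num
  rw [count_even]
  refine List.filterMap_congr (fun k _ => ?_)
  rw [show ((2 : Int) * (k : Int)).toNat = 2 * k by omega]

lemma slice_odd {α : Type} (xs : List α) :
    (PySem.List.slice? xs (some 1) none 2).getD [] = odds xs := by
  cases xs with
  | nil => simp [PySem.List.slice?, PySem.List.sliceIndices, odds, evens]
  | cons x t =>
    have h : odds (x :: t) = evens t := rfl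
    rw [h, ← filterMap_range_evens]
    simp only [PySem.List.slice?, PySem.List.sliceIndices]
    norm_num
    rw [count_even]
    refine List.filterMap_congr (fun k _ => ?_)
    rw [show ((1 : Int) + 2 * (k : Int)).toNat = 2 * k + 1 by omega]
    simp

lemma odds_cons {α : Type} (c : α) (cs : List α) : odds (c :: cs) = evens cs := rfl

lemma gen_split : ∀ (cs : List Char) (pS pR : Int × Int),
    gen cs true pS pR = itl (trailFrom (evens cs) pS) (trailFrom (odds cs) pR) ∧
    gen cs false pS pR = itl (trailFrom (evens cs) pR) (trailFrom (odds cs) pS) := by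
  intro cs
  induction cs with
  | nil => intro pS pR; constructor <;> simp [gen, evens, odds, trailFrom, itl]
  | cons c cs ih =>
    intro pS pR
    constructor
    · simp only [gen, evens_cons, odds_cons, trailFrom, itl, Bool.not_true, if_true]
      exact congrArg _ ((ih _ pR).2)
    · simp only [gen, evens_cons, odds_cons, trailFrom, itl, Bool.not_false,
        if_false, Bool.false_eq_true]
      exact congrArg _ ((ih pS _).1)

lemma zip_itl : ∀ (xs ys acc : List (Int × Int)),
    ys.length ≤ xs.length → xs.length ≤ ys.length + 1 →
    (if ys.length < xs.length then
       ((xs.zip ys).foldl (fun a p => a ++ [p.1] ++ [p.2]) acc) ++ [(PySem.List.pyGet? xs (-1)).getD (0, 0)]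
     else ((xs.zip ys).foldl (fun a p => a ++ [p.1] ++ [p.2]) acc))
    = acc ++ itl xs ys := by
  intro xs
  induction xs with
  | nil =>
    intro ys acc h1 _
    have : ys = [] := by simpa using h1
    subst this
    simp [itl]
  | cons x xs ih =>
    intro ys acc h1 h2
    cases ys with
    | nil =>
      have : xs = [] := by
        have := h2; simp only [List.length_cons, List.length_nil] at this
        exact List.eq_nil_of_length_eq_zero (by omega)
      subst this
      simp [itl, PySem.List.pyGet?_neg_one]
    | cons y ys =>
      have hzip : ((x :: xs).zip (y :: ys)).foldl (fun a p => a ++ [p.1] ++ [p.2]) acc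
          = (xs.zip ys).foldl (fun a p => a ++ [p.1] ++ [p.2]) (acc ++ [x] ++ [y]) := by
        simp [List.zip_cons_cons]
      have hitl : acc ++ itl (x :: xs) (y :: ys) = (acc ++ [x] ++ [y]) ++ itl xs ys := by
        simp [itl]
      have h1' : ys.length ≤ xs.length := by simpa using h1
      have h2' : xs.length ≤ ys.length + 1 := by simpa using h2
      have ihh := ih ys (acc ++ [x] ++ [y]) h1' h2'
      by_cases hlt : ys.length < xs.length
      · have hxs : xs ≠ [] := by intro h; subst h; simp at hlt
        have hlast : (PySem.List.pyGet? (x :: xs) (-1)) = PySem.List.pyGet? xs (-1) := by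
          rw [PySem.List.pyGet?_neg_one, PySem.List.pyGet?_neg_one]
          cases xs with
          | nil => exact absurd rfl hxs
          | cons z zs => exact List.getLast?_cons_cons
        rw [if_pos (by simpa using hlt), hzip, hlast, hitl, ← ihh, if_pos hlt]
      · rw [if_neg (by simpa using hlt), hzip, hitl, ← ihh, if_neg hlt]

-- ===== VERDICT (by name: the statement is the Claim_ definition above) =====
theorem part2_spec : Claim_equal_part2 := by
  intro s _hd
  show part2 s = part2_alt s
  simp only [part2, part2_alt, walkB, slice_even, slice_odd, walk_eq, List.nil_append]
  have hlen1 : (trailFrom (odds s.toList) (0, 0)).length ≤ (trailFrom (evens s.toList) (0, 0)).length := by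
    simp [trailFrom_length, odds, evens_length]; omega
  have hlen2 : (trailFrom (evens s.toList) (0, 0)).length ≤ (trailFrom (odds s.toList) (0, 0)).length + 1 := by
    simp [trailFrom_length, odds, evens_length]; omega
  rw [zip_itl _ _ _ hlen1 hlen2, LA, (gen_split s.toList (0, 0) (0, 0)).1]
  have hseed : (PySem.Dict.empty : PySem.Dict (Int × Int) Int).insert ((0 : Int), (0 : Int)) (1 : Int)
      = PySem.Dict.ofList [(((0 : Int), (0 : Int)), (1 : Int))] := by decide
  simp [List.foldl_cons, hseed]
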